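-- pv_equiv track=rewrite | github.com/Vinhcognito/myAoc | 2025/solutions/day6.py | part_two
-- ===== SOURCE A (Python) =====
-- from collections import defaultdict
-- from math import prod
--
-- class Problem:
--     def __init__(self, input: list[str]):
--         self.sign = input[-1].replace(" ", "")
--         self.ints = []
--         rows = len(input)
--         # process input
--         for col in range(len(input[0])):
--             result = ""
--             for row in range(rows - 1):
--                 if input[row][col] != " ":
--                     result += input[row][col]
--             if result != "":
--                 self.ints.append(int(result))
--
--     def solve(self):
--         if self.sign == "*":
--             return prod(self.ints)
--         else:
--             return sum(self.ints)
--
--     def __str__(self):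
--         return f"{self.sign} " + f"{self.ints}"
--
-- def part_two(input: str):
--     lines = input.split("\n")
--     rows = len(lines)
--     sign_indexes = [i for i, c in enumerate(lines[-1]) if c == "*" or c == "+"]
--
--     d = defaultdict(list)
--
--     for i in range(rows):
--         for col in range(len(sign_indexes)):
--             if col != len(sign_indexes) - 1:
--                 d[col].append(lines[i][sign_indexes[col] : sign_indexes[col + 1]])
--             else:
--                 d[col].append(lines[i][sign_indexes[col] :])
--
--     sum = 0
--     for col in d.keys():
--         p = Problem(d[col])
--         sum += p.solve()
--
--     return sum
-- ===== SOURCE B (Python) =====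
-- def part_two(input: str):
--     lines = input.split("\n")
--     sign_row = lines[-1]
--     num_rows = lines[:-1]
--     width = max(len(l) for l in lines)
--     total = 0
--     op = None
--     acc = 0
--     for j in range(width):
--         c = sign_row[j] if j < len(sign_row) else " "
--         if c == "*" or c == "+":
--             if op is not None:
--                 total += acc
--             op = c
--             acc = 1 if c == "*" else 0
--         if op is None:
--             continue
--         digits = "".join(r[j] for r in num_rows if j < len(r) and r[j] != " ")
--         if digits != "":
--             n = int(digits)
--             acc = acc * n if op == "*" else acc + n
--     if op is not None:
--         total += acc
--     return total
-- ===== Notes on version B (the rewrite author's own statement) =====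
-- stated objective: simpler
-- what changed: Instead of building a dict of per-block line-slice lists via nested row/block loops and re-parsing each block with a Problem object, B makes one left-to-right pass over the columns, switching operator at each sign column of the last row and folding each column's vertical number into a running block accumulator.
-- outside the precondition, e.g. on part_two('12\n*a'): A returns 3, B returns 2; on part_two('1\n22\n*'): A returns 12, B returns 24
import Mathlib
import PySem

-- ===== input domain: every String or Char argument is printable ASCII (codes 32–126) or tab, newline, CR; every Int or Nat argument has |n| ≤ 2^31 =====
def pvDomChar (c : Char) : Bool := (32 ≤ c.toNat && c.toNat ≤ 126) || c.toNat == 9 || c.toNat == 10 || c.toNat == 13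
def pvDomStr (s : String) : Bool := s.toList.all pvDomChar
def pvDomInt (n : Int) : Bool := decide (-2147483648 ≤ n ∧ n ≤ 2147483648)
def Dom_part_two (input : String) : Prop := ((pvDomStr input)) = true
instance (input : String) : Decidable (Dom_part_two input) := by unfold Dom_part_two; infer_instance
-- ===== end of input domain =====

-- B replaces A's dict-of-block-slices + per-block Problem re-parse by a single left-to-right
-- column scan with a running operator/accumulator (objective: simpler; same asymptotic cost).

-- ===== PORT A =====

-- lines = input.split("\n") (both Pythons start with this line)
def pvLines (input : String) : List (List Char) :=
  ((PySem.Str.split? input "\n").getD []).map String.toList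

-- lines[-1] (the list is always nonempty, so the .getD default is never used)
def pvLast (lines : List (List Char)) : List Char :=
  (PySem.List.pyGet? lines (-1)).getD []

-- sign_indexes = [i for i, c in enumerate(lines[-1]) if c == "*" or c == "+"]
def pvSI (lastL : List Char) : List Int :=
  ((PySem.List.enumerate lastL).filter (fun p => p.2 == '*' || p.2 == '+')).map (·.1)

-- Problem.__init__: self.sign = input[-1].replace(" ", "")
def pvProblemSign (block : List (List Char)) : List Char :=
  PySem.Chars.replace (pvLast block) [' '] []

-- Problem.__init__: the per-column int list self.ints
def pvProblemInts (block : List (List Char)) : List Int :=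
  let rows : Int := block.length
  (PySem.List.pyRange 0 (((PySem.List.pyGet? block 0).getD []).length : Int)).foldl
    (fun ints col =>
      let result : List Char := (PySem.List.pyRange 0 (rows - 1)).foldl
        (fun result row =>
          let ch := (PySem.List.pyGet? ((PySem.List.pyGet? block row).getD []) col).getD ' '
          if ch ≠ ' ' then result ++ [ch] else result) []
      -- int(result): on inputs admitted by Pre_ this never fails; .getD 0 is Python's raise
      if result ≠ [] then ints ++ [(PySem.Int.ofChars? result).getD 0] else ints) []

-- Problem.solve
def pvSolve (block : List (List Char)) : Int :=
  if pvProblemSign block = ['*'] then (pvProblemInts block).foldl (· * ·) 1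
  else (pvProblemInts block).foldl (· + ·) 0

def part_two (input : String) : Int :=
  let lines := pvLines input
  let rows : Int := lines.length
  let signIdx := pvSI (pvLast lines)
  let K : Int := signIdx.length
  let d : PySem.Dict Int (List (List Char)) :=
    (PySem.List.pyRange 0 rows).foldl (fun d i =>
      (PySem.List.pyRange 0 K).foldl (fun d col =>
        let line := (PySem.List.pyGet? lines i).getD []
        let s := (PySem.List.pyGet? signIdx col).getD 0
        let seg := if col ≠ K - 1 then
            PySem.List.slice line (some s) (some ((PySem.List.pyGet? signIdx (col + 1)).getD 0))
          else PySem.List.slice line (some s) none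
        d.modify col [] (· ++ [seg])) d) PySem.Dict.empty
  d.keys.foldl (fun sum col => sum + pvSolve (d.getD col [])) 0

-- ===== PORT B =====

-- c = sign_row[j] if j < len(sign_row) else " "
def pvSignAt (signRow : List Char) (j : Int) : Char :=
  if j < (signRow.length : Int) then (PySem.List.pyGet? signRow j).getD ' ' else ' '

-- "".join(r[j] for r in num_rows if j < len(r) and r[j] != " ")
def pvColDigits (numRows : List (List Char)) (j : Int) : List Char :=
  numRows.foldl (fun acc r =>
    if j < (r.length : Int) ∧ (PySem.List.pyGet? r j).getD ' ' ≠ ' '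
    then acc ++ [(PySem.List.pyGet? r j).getD ' '] else acc) []

-- width = max(len(l) for l in lines)  (lines is nonempty, so max never raises)
def pvWidth (lines : List (List Char)) : Int :=
  (PySem.List.max? (lines.map (fun l => (l.length : Int))) id).getD 0

-- the body of B's "for j in range(width)" loop; state = (total, op, acc)
def pvStep (numRows : List (List Char)) (signRow : List Char)
    (st : Int × Option Char × Int) (j : Int) : Int × Option Char × Int :=
  let c := pvSignAt signRow j
  let st2 : Int × Option Char × Int :=
    if c = '*' ∨ c = '+' then
      ((if st.2.1.isSome then st.1 + st.2.2 else st.1), some c, if c = '*' then (1 : Int) else 0)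
    else st
  match st2.2.1 with
  | none => st2
  | some o =>
    let digits := pvColDigits numRows j
    if digits ≠ [] then
      let n := (PySem.Int.ofChars? digits).getD 0
      (st2.1, some o, if o = '*' then st2.2.2 * n else st2.2.2 + n)
    else st2

def part_two_alt (input : String) : Int :=
  let lines := pvLines input
  let signRow := pvLast lines
  let numRows := PySem.List.slice lines none (some (-1))
  let res := (PySem.List.pyRange 0 (pvWidth lines)).foldl (pvStep numRows signRow) (0, none, 0)
  match res.2.1 with
  | none => res.1
  | some _ => res.1 + res.2.2

-- ===== PRECONDITION & SPEC =====

-- Pre_ admits every input whose last line has no sign at all (A returns 0 there), and otherwise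
-- the well-formed grids: all non-last lines of equal length (on ragged lines A groups columns by
-- an accidental slice length, or raises IndexError), non-last lines containing only digits and
-- spaces (other characters generally make A raise ValueError), and a last line made of spaces
-- and signs only (a non-space character next to a sign makes A fall back to summing the block,
-- an accident of its operator test).
def Pre_part_two (input : String) : Prop :=
  let lines := ((PySem.Str.split? input "\n").getD []).map String.toList
  let lastL := (PySem.List.pyGet? lines (-1)).getD ([] : List Char)
  (lastL.all (fun c => !(c == '*' || c == '+')) = true) ∨
  ((lines.dropLast.all (fun r => r.length == (lines.headD []).length) = true) ∧
   (lines.dropLast.all (fun r => r.all (fun c => PySem.Chars.isdigit c || c == ' ')) = true) ∧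
   (lastL.all (fun c => c == ' ' || c == '*' || c == '+') = true))

instance (input : String) : Decidable (Pre_part_two input) := by
  unfold Pre_part_two; infer_instance

def pvWitness_part_two : String := "1 2\n* +"

def Spec_part_two (input : String) (out : Int) : Prop := out = part_two_alt input
instance (input : String) (out : Int) : Decidable (Spec_part_two input out) := by
  unfold Spec_part_two; infer_instance

-- ===== CLAIM (what is proved, stated in full; the proofs are below) =====
def Claim_equal_part_two : Prop :=
  ∀ (input : String), Dom_part_two input → Pre_part_two input → Spec_part_two input (part_two input)

-- ===== LEMMAS AND PROOFS =====

-- ---- proof-side notions ----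

def pvQ (lastL : List Char) (j : Int) : Bool :=
  pvSignAt lastL j == '*' || pvSignAt lastL j == '+'

def pvOpFold (o : Char) (acc : Int) (ns : List Int) : Int :=
  ns.foldl (fun a n => if o = '*' then a * n else a + n) acc

def pvIdent (o : Char) : Int := if o = '*' then 1 else 0

def pvColNum? (nr : List (List Char)) (j : Int) : Option Int :=
  if pvColDigits nr j = [] then none else some ((PySem.Int.ofChars? (pvColDigits nr j)).getD 0)

def pvNums (nr : List (List Char)) (js : List Int) : List Int := js.filterMap (pvColNum? nr)

-- the total, block by block: for each sign position s, fold the column numbers of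
-- [s, next sign or W) into the operator's identity, and add the blocks up
def pvAB (nr : List (List Char)) (lastL : List Char) (W : Int) : List Int → Int
  | [] => 0
  | s :: rest =>
      pvOpFold (pvSignAt lastL s) (pvIdent (pvSignAt lastL s))
        (pvNums nr (PySem.List.pyRange s (rest.headD W))) + pvAB nr lastL W rest

def pvPairs : List Int → List (Int × Option Int)
  | [] => []
  | [s] => [(s, none)]
  | s :: s2 :: r => (s, some s2) :: pvPairs (s2 :: r)

def pvSliceFor (p : Int × Option Int) (line : List Char) : List Char :=
  match p.2 with
  | some e => PySem.List.slice line (some p.1) (some e)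
  | none => PySem.List.slice line (some p.1) none

-- ---- small utilities ----

theorem pv_splitOn_go_ne_nil (sep : List Char) :
    ∀ (fuel : Nat) (l cur : List Char) (acc : List (List Char)),
      PySem.Chars.splitOn.go sep fuel l cur acc ≠ [] := by
  intro fuel
  induction fuel with
  | zero => intro l cur acc; cases l <;> simp [PySem.Chars.splitOn.go]
  | succ n ih =>
    intro l cur acc
    cases l with
    | nil => simp [PySem.Chars.splitOn.go]
    | cons c t =>
      rw [PySem.Chars.splitOn.go]
      split
      · exact ih _ _ _
      · exact ih _ _ _

theorem pvLines_ne_nil (input : String) : pvLines input ≠ [] := by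
  unfold pvLines
  simp only [PySem.Str.split?]
  rw [show PySem.Chars.split? input.toList "\n".toList = some (PySem.Chars.splitOn input.toList "\n".toList) from by
    simp [PySem.Chars.split?]]
  simp only [Option.map_some, Option.getD_some, ne_eq, List.map_eq_nil_iff]
  simp only [PySem.Chars.splitOn]
  exact pv_splitOn_go_ne_nil _ _ _ _ _

theorem pv_pyGet_neg_one {α : Type} (l : List α) (d : α) (h : l ≠ []) :
    (PySem.List.pyGet? l (-1)).getD d = l.getLast h := by
  have hl : 0 < l.length := List.length_pos_iff.mpr h
  simp only [PySem.List.pyGet?, PySem.List.pyIdx?]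
  norm_num
  rw [if_pos (by omega : 1 ≤ l.length)]
  simp only [Option.bind]
  rw [List.getElem?_eq_getElem (by omega)]
  simp [List.getLast_eq_getElem]

theorem pv_replace_space (cs : List Char) :
    PySem.Chars.replace cs [' '] [] = cs.filter (· ≠ ' ') := by
  have go : ∀ (fuel : Nat) (l acc : List Char), l.length ≤ fuel →
      PySem.Chars.replace.go [' '] [] fuel l acc = acc.reverse ++ l.filter (· ≠ ' ') := by
    intro fuel
    induction fuel with
    | zero =>
      intro l acc h
      have : l = [] := List.length_eq_zero_iff.mp (by omega)
      subst this; simp [PySem.Chars.replace.go]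
    | succ n ih =>
      intro l acc h
      cases l with
      | nil => simp [PySem.Chars.replace.go]
      | cons c t =>
        rw [PySem.Chars.replace.go]
        by_cases hc : c = ' '
        · subst hc
          rw [if_pos (by simp [List.isPrefixOf])]
          simpa using ih t acc (by simpa using h)
        · rw [if_neg (by simp [List.isPrefixOf]; exact fun hx => hc hx.symm)]
          rw [ih t (c :: acc) (by simpa using h)]
          simp [hc]
  simp only [PySem.Chars.replace]
  rw [if_neg (by simp)]
  exact go _ _ _ (le_refl _)

theorem pv_dropLast_map {α β : Type} (f : α → β) (l : List α) :
    (l.map f).dropLast = l.dropLast.map f := by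
  simp [List.dropLast_eq_take, List.map_take]

theorem pvWidth_ge (lines : List (List Char)) (l : List Char) (hl : l ∈ lines) :
    (l.length : Int) ≤ pvWidth lines := by
  have key : ∀ (g : Option Int → Int → Option Int), (∀ m y, (g (some m) y).isSome = true) →
      ∀ (xs : List Int) (m : Int), ((xs.foldl g (some m)).isSome = true) := by
    intro g hg xs
    induction xs with
    | nil => simp
    | cons y t ih =>
      intro m
      simp only [List.foldl_cons]
      obtain ⟨m2, hm2⟩ := Option.isSome_iff_exists.mp (hg m y)
      rw [hm2]; exact ih m2
  have hmem : (l.length : Int) ∈ lines.map (fun l => (l.length : Int)) :=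
    List.mem_map_of_mem hl
  have hsome : ∃ m, PySem.List.max? (lines.map (fun l => (l.length : Int))) id = some m := by
    unfold PySem.List.max?
    cases hx : lines.map (fun l => (l.length : Int)) with
    | nil => rw [hx] at hmem; simp at hmem
    | cons y t =>
      simp only [List.foldl_cons]
      exact Option.isSome_iff_exists.mp (key _ (by intro m z; simp; split <;> simp) t y)
  obtain ⟨m, hm⟩ := hsome
  unfold pvWidth
  rw [hm]
  exact PySem.List.max?_isMax hm _ hmem

theorem pvOpFold_append (o : Char) (acc : Int) (l1 l2 : List Int) :
    pvOpFold o (pvOpFold o acc l1) l2 = pvOpFold o acc (l1 ++ l2) := by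
  simp [pvOpFold, List.foldl_append]

theorem pvNums_append (nr : List (List Char)) (l1 l2 : List Int) :
    pvNums nr (l1 ++ l2) = pvNums nr l1 ++ pvNums nr l2 := by
  simp [pvNums]

theorem pvNums_nil_of (nr : List (List Char)) (js : List Int)
    (h : ∀ j ∈ js, pvColDigits nr j = []) : pvNums nr js = [] := by
  unfold pvNums
  rw [List.filterMap_eq_nil_iff]
  intro j hj
  simp [pvColNum?, h j hj]

theorem pvNums_singleton (nr : List (List Char)) (j : Int) :
    pvNums nr [j] = match pvColNum? nr j with | some n => [n] | none => [] := by
  unfold pvNums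
  cases h : pvColNum? nr j <;> simp [List.filterMap, h]

-- ---- sign-index list ----

theorem pvQ_lt_len (lastL : List Char) (j : Int) (h : pvQ lastL j = true) :
    j < (lastL.length : Int) := by
  by_contra hj
  unfold pvQ pvSignAt at h
  rw [if_neg hj] at h
  simp at h

theorem pvSI_eq_filter (lastL : List Char) :
    pvSI lastL = (PySem.List.pyRange 0 (lastL.length : Int)).filter (pvQ lastL) := by
  unfold pvSI
  rw [PySem.List.enumerate_eq_map_pyRange lastL ' ']
  rw [List.filter_map, List.map_map]
  have hlen : PySem.List.len lastL = (lastL.length : Int) := by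
    simp [PySem.List.len]
  rw [hlen]
  rw [show ((fun p : Int × Char => p.1) ∘ fun j => (j, PySem.List.pyGetD lastL j ' ')) = id from rfl]
  rw [List.map_id]
  apply List.filter_congr
  intro j hj
  rw [PySem.List.mem_pyRange_one] at hj
  unfold pvQ pvSignAt
  rw [if_pos hj.2]
  rfl

theorem mem_pvSI (lastL : List Char) (j : Int) :
    j ∈ pvSI lastL ↔ pvQ lastL j = true ∧ 0 ≤ j := by
  rw [pvSI_eq_filter]
  simp only [List.mem_filter, PySem.List.mem_pyRange_one]
  constructor
  · rintro ⟨⟨h0, _⟩, hq⟩; exact ⟨hq, h0⟩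
  · rintro ⟨hq, h0⟩; exact ⟨⟨h0, pvQ_lt_len lastL j hq⟩, hq⟩

theorem pvSI_sorted (lastL : List Char) : (pvSI lastL).Pairwise (· < ·) := by
  rw [pvSI_eq_filter]
  exact (PySem.List.pairwise_lt_pyRange_one _ _).filter _

theorem pvSI_lt_len (lastL : List Char) (j : Int) (h : j ∈ pvSI lastL) :
    j < (lastL.length : Int) := by
  exact pvQ_lt_len lastL j ((mem_pvSI lastL j).mp h).1

-- ---- pvPairs structure ----

theorem mem_fst_pvPairs (S : List Int) (p : Int × Option Int) (h : p ∈ pvPairs S) : p.1 ∈ S := by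
  induction S using pvPairs.induct with
  | case1 => simp [pvPairs] at h
  | case2 s => simp [pvPairs] at h; simp [h]
  | case3 s s2 r ih =>
    rw [pvPairs] at h
    rcases List.mem_cons.mp h with h | h
    · subst h; simp
    · exact List.mem_cons_of_mem _ (ih h)

theorem pvPairs_some (S : List Int) (hs : S.Pairwise (· < ·)) (s e : Int)
    (h : (s, some e) ∈ pvPairs S) :
    e ∈ S ∧ s < e ∧ ∀ j, s < j → j < e → j ∉ S := by
  induction S using pvPairs.induct with
  | case1 => simp [pvPairs] at h
  | case2 s' => simp [pvPairs] at h
  | case3 s0 s2 r ih =>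
    rw [pvPairs] at h
    have hs' : (s2 :: r).Pairwise (· < ·) := hs.of_cons
    rcases List.mem_cons.mp h with h | h
    · obtain ⟨hs0, he⟩ : s = s0 ∧ some e = some s2 := by
        constructor <;> [exact congrArg Prod.fst h; exact congrArg Prod.snd h]
      obtain he : e = s2 := by injection he
      subst hs0; subst he
      refine ⟨by simp, ?_, ?_⟩
      · exact List.rel_of_pairwise_cons hs (by simp)
      · intro j h1 h2 hj
        rcases List.mem_cons.mp hj with rfl | hj
        · omega
        · rcases List.mem_cons.mp hj with rfl | hj
          · omega
          · have := List.rel_of_pairwise_cons hs' hj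
            omega
    · obtain ⟨he, hlt, hbet⟩ := ih hs' h
      have hsmem : s ∈ s2 :: r := mem_fst_pvPairs _ _ h
      refine ⟨List.mem_cons_of_mem _ he, hlt, ?_⟩
      intro j h1 h2 hj
      rcases List.mem_cons.mp hj with rfl | hj
      · have := List.rel_of_pairwise_cons hs hsmem
        omega
      · exact hbet j h1 h2 hj

theorem pvPairs_none (S : List Int) (hs : S.Pairwise (· < ·)) (s : Int)
    (h : (s, none) ∈ pvPairs S) : ∀ j ∈ S, j ≤ s := by
  induction S using pvPairs.induct with
  | case1 => simp [pvPairs] at h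
  | case2 s' =>
    simp [pvPairs] at h
    intro j hj
    rcases List.mem_cons.mp hj with rfl | hj
    · omega
    · simp at hj
  | case3 s0 s2 r ih =>
    rw [pvPairs] at h
    have hs' : (s2 :: r).Pairwise (· < ·) := hs.of_cons
    rcases List.mem_cons.mp h with h | h
    · exact absurd (congrArg Prod.snd h) (by simp)
    · have hsmem : s ∈ s2 :: r := mem_fst_pvPairs _ _ h
      intro j hj
      rcases List.mem_cons.mp hj with rfl | hj
      · have := List.rel_of_pairwise_cons hs hsmem
        omega
      · exact ih hs' h j hj

theorem sum_pvPairs_eq_AB (nr : List (List Char)) (lastL : List Char) (W : Int) (S : List Int) :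
    ((pvPairs S).map (fun p =>
        pvOpFold (pvSignAt lastL p.1) (pvIdent (pvSignAt lastL p.1))
          (pvNums nr (PySem.List.pyRange p.1 (p.2.getD W))))).sum
      = pvAB nr lastL W S := by
  induction S using pvPairs.induct with
  | case1 => simp [pvPairs, pvAB]
  | case2 s => simp [pvPairs, pvAB]
  | case3 s s2 r ih =>
    rw [pvPairs, pvAB]
    simp only [List.map_cons, List.sum_cons]
    rw [ih]
    rfl

-- ---- B-side: the scan ----

theorem pvStep_nonsign_none (nr : List (List Char)) (lastL : List Char) (j t acc : Int)
    (h : pvQ lastL j = false) : pvStep nr lastL (t, none, acc) j = (t, none, acc) := by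
  have hc : ¬(pvSignAt lastL j = '*' ∨ pvSignAt lastL j = '+') := by
    unfold pvQ at h; simpa using h
  unfold pvStep
  dsimp only
  rw [if_neg hc]

theorem pvStep_nonsign_some (nr : List (List Char)) (lastL : List Char) (j t acc : Int) (o : Char)
    (h : pvQ lastL j = false) :
    pvStep nr lastL (t, some o, acc) j = (t, some o, pvOpFold o acc (pvNums nr [j])) := by
  have hc : ¬(pvSignAt lastL j = '*' ∨ pvSignAt lastL j = '+') := by
    unfold pvQ at h; simpa using h
  unfold pvStep
  dsimp only
  rw [if_neg hc]
  by_cases hd : pvColDigits nr j = []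
  · simp [hd, pvNums_singleton, pvColNum?, pvOpFold]
  · simp only [hd, ne_eq, not_false_iff, if_pos]
    rw [pvNums_singleton]
    simp [pvColNum?, hd, pvOpFold]

theorem pvStep_sign (nr : List (List Char)) (lastL : List Char) (j t acc : Int) (op : Option Char)
    (h : pvQ lastL j = true) :
    pvStep nr lastL (t, op, acc) j =
      ((if op.isSome then t + acc else t), some (pvSignAt lastL j),
        pvOpFold (pvSignAt lastL j) (pvIdent (pvSignAt lastL j)) (pvNums nr [j])) := by
  have hc : pvSignAt lastL j = '*' ∨ pvSignAt lastL j = '+' := by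
    unfold pvQ at h
    rcases Bool.or_eq_true_iff.mp h with h | h
    · exact Or.inl (by simpa using h)
    · exact Or.inr (by simpa using h)
  unfold pvStep
  dsimp only
  rw [if_pos hc]
  by_cases hd : pvColDigits nr j = []
  · simp [hd, pvNums_singleton, pvColNum?, pvOpFold, pvIdent]
  · simp only [hd, ne_eq, not_false_iff, if_pos]
    rw [pvNums_singleton]
    simp [pvColNum?, hd, pvOpFold, pvIdent]

theorem pv_scan_none (nr : List (List Char)) (lastL : List Char) :
    ∀ (n : Nat) (a b t acc : Int), (b - a).toNat = n →
      (∀ j, a ≤ j → j < b → pvQ lastL j = false) →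
      (PySem.List.pyRange a b).foldl (pvStep nr lastL) (t, none, acc) = (t, none, acc) := by
  intro n
  induction n with
  | zero =>
    intro a b t acc hn hq
    rw [PySem.List.pyRange_one_eq_nil (by omega)]
    rfl
  | succ m ih =>
    intro a b t acc hn hq
    have hab : a < b := by omega
    rw [PySem.List.pyRange_one_cons hab, List.foldl_cons]
    rw [pvStep_nonsign_none nr lastL a t acc (hq a le_rfl hab)]
    exact ih (a + 1) b t acc (by omega) (fun j h1 h2 => hq j (by omega) h2)

theorem pv_scan_seg (nr : List (List Char)) (lastL : List Char) :
    ∀ (n : Nat) (a b t acc : Int) (o : Char), (b - a).toNat = n →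
      (∀ j, a ≤ j → j < b → pvQ lastL j = false) →
      (PySem.List.pyRange a b).foldl (pvStep nr lastL) (t, some o, acc)
        = (t, some o, pvOpFold o acc (pvNums nr (PySem.List.pyRange a b))) := by
  intro n
  induction n with
  | zero =>
    intro a b t acc o hn hq
    rw [PySem.List.pyRange_one_eq_nil (by omega)]
    simp [pvNums, pvOpFold]
  | succ m ih =>
    intro a b t acc o hn hq
    have hab : a < b := by omega
    rw [PySem.List.pyRange_one_cons hab, List.foldl_cons]
    rw [pvStep_nonsign_some nr lastL a t acc o (hq a le_rfl hab)]
    rw [ih (a + 1) b t _ o (by omega) (fun j h1 h2 => hq j (by omega) h2)]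
    rw [pvOpFold_append, ← pvNums_append]
    rfl

theorem pv_scan_main (nr : List (List Char)) (lastL : List Char) (W : Int) :
    ∀ (S' : List Int) (a : Int) (o : Char) (t acc : Int),
      a ≤ W → S'.Pairwise (· < ·) →
      (∀ j, a ≤ j → j < W → (pvQ lastL j = true ↔ j ∈ S')) →
      (∀ j ∈ S', a ≤ j ∧ j < W) →
      ∃ o' t' acc',
        (PySem.List.pyRange a W).foldl (pvStep nr lastL) (t, some o, acc) = (t', some o', acc') ∧
        t' + acc' = t + pvOpFold o acc (pvNums nr (PySem.List.pyRange a (S'.headD W))) +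
          pvAB nr lastL W S' := by
  intro S'
  induction S' with
  | nil =>
    intro a o t acc haW hp hiff hbd
    refine ⟨o, t, pvOpFold o acc (pvNums nr (PySem.List.pyRange a W)), ?_, ?_⟩
    · exact pv_scan_seg nr lastL _ a W t acc o rfl
        (fun j h1 h2 => by
          by_contra hq
          have := (hiff j h1 h2).mp (by simpa using hq)
          simp at this)
    · simp [pvAB]
  | cons s rest ih =>
    intro a o t acc haW hp hiff hbd
    have hs : a ≤ s ∧ s < W := hbd s (by simp)
    have hqs : pvQ lastL s = true := (hiff s hs.1 hs.2).mpr (by simp)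
    have hnos : ∀ j, a ≤ j → j < s → pvQ lastL j = false := by
      intro j h1 h2
      by_contra hq
      have hj : j ∈ s :: rest := (hiff j h1 (by omega)).mp (by simpa using hq)
      rcases List.mem_cons.mp hj with rfl | hj
      · omega
      · have := List.rel_of_pairwise_cons hp hj
        omega
    rw [PySem.List.pyRange_one_append a s W hs.1 (by omega), List.foldl_append]
    rw [pv_scan_seg nr lastL _ a s t acc o rfl hnos]
    rw [PySem.List.pyRange_one_cons (by omega : s < W), List.foldl_cons]
    rw [pvStep_sign nr lastL s _ _ _ hqs]
    simp only [Option.isSome_some, if_pos]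
    obtain ⟨o', t', acc', heq, hval⟩ := ih (s + 1) (pvSignAt lastL s)
      (t + pvOpFold o acc (pvNums nr (PySem.List.pyRange a s)))
      (pvOpFold (pvSignAt lastL s) (pvIdent (pvSignAt lastL s)) (pvNums nr [s]))
      (by omega) hp.of_cons
      (fun j h1 h2 => by
        rw [hiff j (by omega) h2]
        constructor
        · intro hj
          rcases List.mem_cons.mp hj with rfl | hj
          · omega
          · exact hj
        · exact fun hj => List.mem_cons_of_mem _ hj)
      (fun j hj => ⟨by
          have := List.rel_of_pairwise_cons hp hj
          omega,
        (hbd j (List.mem_cons_of_mem _ hj)).2⟩)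
    refine ⟨o', t', acc', heq, ?_⟩
    rw [hval]
    have hcomb : pvOpFold (pvSignAt lastL s)
        (pvOpFold (pvSignAt lastL s) (pvIdent (pvSignAt lastL s)) (pvNums nr [s]))
        (pvNums nr (PySem.List.pyRange (s + 1) (rest.headD W)))
        = pvOpFold (pvSignAt lastL s) (pvIdent (pvSignAt lastL s))
            (pvNums nr (PySem.List.pyRange s (rest.headD W))) := by
      rw [pvOpFold_append, ← pvNums_append]
      congr 2
      have hsh : s < rest.headD W := by
        cases rest with
        | nil => simpa using hs.2
        | cons s2 r2 =>
          simpa using List.rel_of_pairwise_cons hp (by simp : s2 ∈ s2 :: r2)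
      rw [PySem.List.pyRange_one_cons hsh]
      rfl
    rw [show (s :: rest).headD W = s from rfl, pvAB]
    rw [hcomb]
    ring
  

theorem pv_last_mem (lines : List (List Char)) (hne : lines ≠ []) :
    pvLast lines ∈ lines ∧ (pvLast lines).length ≤ (pvWidth lines).toNat := by
  have h1 : pvLast lines = lines.getLast hne := pv_pyGet_neg_one lines [] hne
  have h2 : pvLast lines ∈ lines := h1 ▸ List.getLast_mem hne
  have h3 := pvWidth_ge lines _ h2
  exact ⟨h2, by omega⟩

theorem pv_scan_total (lines : List (List Char)) (hne : lines ≠ []) :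
    (let res := (PySem.List.pyRange 0 (pvWidth lines)).foldl
        (pvStep lines.dropLast (pvLast lines)) ((0 : Int), (none : Option Char), (0 : Int));
     match res.2.1 with
     | none => res.1
     | some _ => res.1 + res.2.2)
    = pvAB lines.dropLast (pvLast lines) (pvWidth lines) (pvSI (pvLast lines)) := by
  obtain ⟨hmem, hlen⟩ := pv_last_mem lines hne
  have hLW : ((pvLast lines).length : Int) ≤ pvWidth lines := pvWidth_ge lines _ hmem
  have hW0 : 0 ≤ pvWidth lines := le_trans (by positivity) hLW
  have hnotin : ∀ j, pvQ (pvLast lines) j = true → 0 ≤ j → j ∈ pvSI (pvLast lines) :=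
    fun j hq h0 => (mem_pvSI _ j).mpr ⟨hq, h0⟩
  cases hS : pvSI (pvLast lines) with
  | nil =>
    have hzero : (PySem.List.pyRange 0 (pvWidth lines)).foldl
        (pvStep lines.dropLast (pvLast lines)) ((0 : Int), (none : Option Char), (0 : Int))
        = (0, none, 0) := by
      apply pv_scan_none lines.dropLast (pvLast lines) (pvWidth lines - 0).toNat 0 _ 0 0 rfl
      intro j h0 hj
      by_contra hq
      have := hnotin j (by simpa using hq) h0
      rw [hS] at this
      simp at this
    simp only [hzero]
    rfl
  | cons s0 rest =>
    have hsort : (pvSI (pvLast lines)).Pairwise (· < ·) := pvSI_sorted _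
    rw [hS] at hsort
    have hs0mem : s0 ∈ pvSI (pvLast lines) := by rw [hS]; simp
    have hs00 : 0 ≤ s0 := ((mem_pvSI _ s0).mp hs0mem).2
    have hq0 : pvQ (pvLast lines) s0 = true := ((mem_pvSI _ s0).mp hs0mem).1
    have hs0W : s0 < pvWidth lines := lt_of_lt_of_le (pvSI_lt_len _ _ hs0mem) hLW
    rw [PySem.List.pyRange_one_append 0 s0 (pvWidth lines) hs00 (by omega)]
    rw [List.foldl_append]
    rw [pv_scan_none lines.dropLast (pvLast lines) (s0 - 0).toNat 0 s0 0 0 rfl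
      (by
        intro j h0 hj
        by_contra hq
        have hjm := hnotin j (by simpa using hq) h0
        rw [hS] at hjm
        rcases List.mem_cons.mp hjm with rfl | hjm
        · omega
        · have := List.rel_of_pairwise_cons hsort hjm
          omega)]
    rw [PySem.List.pyRange_one_cons hs0W, List.foldl_cons]
    rw [pvStep_sign lines.dropLast (pvLast lines) s0 0 0 none hq0]
    simp only [Option.isSome_none, Bool.false_eq_true, ite_false]
    obtain ⟨o', t', acc', heq, hval⟩ := pv_scan_main lines.dropLast (pvLast lines) (pvWidth lines)
      rest (s0 + 1) (pvSignAt (pvLast lines) s0) 0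
      (pvOpFold (pvSignAt (pvLast lines) s0) (pvIdent (pvSignAt (pvLast lines) s0))
        (pvNums lines.dropLast [s0]))
      (by omega) hsort.of_cons
      (by
        intro j h1 h2
        constructor
        · intro hq
          have hjm := hnotin j hq (by omega)
          rw [hS] at hjm
          rcases List.mem_cons.mp hjm with rfl | hjm
          · omega
          · exact hjm
        · intro hj
          exact ((mem_pvSI _ j).mp (by rw [hS]; exact List.mem_cons_of_mem _ hj)).1)
      (by
        intro j hj
        have hjm : j ∈ pvSI (pvLast lines) := by rw [hS]; exact List.mem_cons_of_mem _ hj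
        refine ⟨by have := List.rel_of_pairwise_cons hsort hj; omega, ?_⟩
        exact lt_of_lt_of_le (pvSI_lt_len _ _ hjm) hLW)
    simp only [heq]
    rw [pvAB]
    rw [hval]
    have hcomb : pvOpFold (pvSignAt (pvLast lines) s0)
        (pvOpFold (pvSignAt (pvLast lines) s0) (pvIdent (pvSignAt (pvLast lines) s0))
          (pvNums lines.dropLast [s0]))
        (pvNums lines.dropLast (PySem.List.pyRange (s0 + 1) (rest.headD (pvWidth lines))))
        = pvOpFold (pvSignAt (pvLast lines) s0) (pvIdent (pvSignAt (pvLast lines) s0))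
            (pvNums lines.dropLast (PySem.List.pyRange s0 (rest.headD (pvWidth lines)))) := by
      rw [pvOpFold_append, ← pvNums_append]
      congr 2
      have hsh : s0 < rest.headD (pvWidth lines) := by
        cases rest with
        | nil => simpa using hs0W
        | cons s2 r2 =>
          simpa using List.rel_of_pairwise_cons hsort (by simp : s2 ∈ s2 :: r2)
      rw [PySem.List.pyRange_one_cons hsh]
      rfl
    rw [hcomb]
    ring

theorem pv_alt_eq_AB (input : String) :
    part_two_alt input =
      pvAB (pvLines input).dropLast (pvLast (pvLines input)) (pvWidth (pvLines input))
        (pvSI (pvLast (pvLines input))) := by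
  unfold part_two_alt
  dsimp only
  rw [PySem.List.slice_to_neg_one]
  exact pv_scan_total (pvLines input) (pvLines_ne_nil input)

-- ---- A-side ----

-- ---- A-side helpers ----

theorem pv_flatMap_eq_flatten_map {α β : Type} (l : List α) (g : α → List β) :
    l.flatMap g = (l.map g).flatten := by
  induction l with
  | nil => rfl
  | cons x t ih => simp [ih]

theorem pv_flatMap_singleton {α β : Type} (l : List α) (h : α → β) :
    (l.flatMap fun i => [h i]) = l.map h := by
  induction l with
  | nil => rfl
  | cons x t ih => simp [ih]

theorem pv_set_update_append (s : PySem.Set Int) (l1 l2 : List Int) :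
    PySem.Set.update s (l1 ++ l2) = PySem.Set.update (PySem.Set.update s l1) l2 :=
  List.foldl_append

theorem pv_set_update_mem (l : List Int) (s : PySem.Set Int) (h : ∀ x ∈ l, x ∈ s) :
    PySem.Set.update s l = s := by
  induction l generalizing s with
  | nil => rfl
  | cons x t ih =>
    have hadd : s.add x = s := by
      unfold PySem.Set.add
      rw [if_pos (by simpa using h x (by simp))]
    show PySem.Set.update (s.add x) t = s
    rw [hadd]
    exact ih s (fun y hy => h y (List.mem_cons_of_mem _ hy))

theorem pv_set_update_fresh (l : List Int) :
    ∀ (s : PySem.Set Int), (∀ x ∈ l, x ∉ s) → l.Nodup → PySem.Set.update s l = s ++ l := by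
  induction l with
  | nil => intro s _ _; simp [PySem.Set.update]
  | cons x t ih =>
    intro s hnotin hnd
    have hadd : s.add x = s ++ [x] := by
      unfold PySem.Set.add
      rw [if_neg (by simpa using hnotin x (by simp))]
    show PySem.Set.update (s.add x) t = s ++ x :: t
    rw [hadd, ih (s ++ [x])
      (by
        intro y hy
        simp only [List.mem_append, List.mem_singleton]
        rintro (hs | rfl)
        · exact hnotin y (List.mem_cons_of_mem _ hy) hs
        · exact (List.nodup_cons.mp hnd).1 hy)
      (List.nodup_cons.mp hnd).2]
    simp

theorem pv_filter_beq_singleton (l : List Int) (a : Int) (h : l.Nodup) (hm : a ∈ l) :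
    l.filter (· == a) = [a] := by
  rw [List.filter_beq, List.count_eq_one_of_mem h hm]
  rfl

theorem pv_map_range_pairs (S : List Int) (G : Int → Option Int → Int) :
    (PySem.List.pyRange 0 (S.length : Int)).map (fun col =>
        G ((PySem.List.pyGet? S col).getD 0)
          (if col ≠ (S.length : Int) - 1 then some ((PySem.List.pyGet? S (col + 1)).getD 0)
           else none))
      = (pvPairs S).map (fun p => G p.1 p.2) := by
  induction S using pvPairs.induct with
  | case1 => simp [pvPairs]
  | case2 s =>
    rw [show ((([s] : List Int).length : Int)) = 0 + 1 from by simp]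
    rw [PySem.List.pyRange_one_singleton]
    simp [pvPairs, PySem.List.pyGet?, PySem.List.pyIdx?]
  | case3 s s2 r ih =>
    have hlen : ((s :: s2 :: r).length : Int) = ((s2 :: r).length : Int) + 1 := by
      push_cast [List.length_cons]; ring
    rw [PySem.List.pyRange_one_cons (by simp; omega : (0:Int) < ((s :: s2 :: r).length : Int))]
    rw [show pvPairs (s :: s2 :: r) = (s, some s2) :: pvPairs (s2 :: r) from rfl]
    rw [List.map_cons, List.map_cons]
    congr 1
    · rw [if_pos (by simp; omega : (0:Int) ≠ ((s :: s2 :: r).length : Int) - 1)]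
      rw [show (PySem.List.pyGet? (s :: s2 :: r) 0) = some s from by
        rw [show (0:Int) = ((0:Nat):Int) from rfl, PySem.List.pyGet?_natCast]; rfl]
      rw [show (PySem.List.pyGet? (s :: s2 :: r) (0+1)) = some s2 from by
        rw [show (0:Int)+1 = ((1:Nat):Int) from rfl, PySem.List.pyGet?_natCast]; rfl]
      rfl
    · rw [← ih]
      rw [show PySem.List.pyRange (0+1) ((s :: s2 :: r).length : Int)
            = (PySem.List.pyRange 0 ((s2 :: r).length : Int)).map (· + 1) from by
        rw [PySem.List.pyRange_one (0+1), PySem.List.pyRange_one 0]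
        rw [show (((s :: s2 :: r).length : Int) - (0 + 1)).toNat
              = (((s2 :: r).length : Int) - 0).toNat from by simp]
        rw [List.map_map]
        apply List.map_congr_left
        intro k _
        simp
        ring]
      rw [List.map_map]
      apply List.map_congr_left
      intro col hcol
      rw [PySem.List.mem_pyRange_one] at hcol
      simp only [Function.comp_apply]
      obtain ⟨k, hk, rfl⟩ : ∃ k : Nat, (k : Int) < ((s2 :: r).length : Int) ∧ (k : Int) = col := by
        exact ⟨col.toNat, by omega, by omega⟩
      congr 1
      · rw [show (k : Int) + 1 = ((k+1 : Nat) : Int) from by push_cast; ring]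
        rw [PySem.List.pyGet?_natCast, PySem.List.pyGet?_natCast]
        rfl
      · have hiff : ((k : Int) + 1 ≠ ((s :: s2 :: r).length : Int) - 1)
            ↔ ((k : Int) ≠ ((s2 :: r).length : Int) - 1) := by
          rw [hlen]; omega
        by_cases hc : (k : Int) ≠ ((s2 :: r).length : Int) - 1
        · rw [if_pos (hiff.mpr hc), if_pos hc]
          rw [show (k : Int) + 1 + 1 = ((k+2 : Nat) : Int) from by push_cast; ring]
          rw [show (k : Int) + 1 = ((k+1 : Nat) : Int) from by push_cast; ring]
          rw [PySem.List.pyGet?_natCast, PySem.List.pyGet?_natCast]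
          rfl
        · rw [if_neg (by rw [hiff]; exact hc), if_neg hc]

theorem pv_A_dict (lines : List (List Char)) (hne : lines ≠ []) (K : Int)
    (h : List Char → Int → List Char) :
    (let d := (PySem.List.pyRange 0 (lines.length : Int)).foldl (fun d i =>
        (PySem.List.pyRange 0 K).foldl (fun d col =>
          d.modify col [] (· ++ [h ((PySem.List.pyGet? lines i).getD []) col])) d)
        PySem.Dict.empty;
     d.keys.foldl (fun sum col => sum + pvSolve (d.getD col [])) 0)
    = ((PySem.List.pyRange 0 K).map
        (fun col => pvSolve (lines.map (fun line => h line col)))).sum := by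
  dsimp only
  have hR : 0 < (lines.length : Int) := by
    have := List.length_pos_iff.mpr hne
    omega
  have hdict : (PySem.List.pyRange 0 (lines.length : Int)).foldl (fun d i =>
      (PySem.List.pyRange 0 K).foldl (fun d col =>
        d.modify col [] (· ++ [h ((PySem.List.pyGet? lines i).getD []) col])) d)
      PySem.Dict.empty
      = ((PySem.List.pyRange 0 (lines.length : Int)).flatMap (fun i =>
          (PySem.List.pyRange 0 K).map (fun col =>
            (col, h ((PySem.List.pyGet? lines i).getD []) col)))).foldl
          (fun d p => d.modify p.1 [] (· ++ [p.2])) PySem.Dict.empty := by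
    rw [pv_flatMap_eq_flatten_map, List.foldl_flatten, List.foldl_map]
    simp only [List.foldl_map]
  rw [hdict]
  have hfst : ((PySem.List.pyRange 0 (lines.length : Int)).flatMap (fun i =>
      (PySem.List.pyRange 0 K).map (fun col =>
        (col, h ((PySem.List.pyGet? lines i).getD []) col)))).map Prod.fst
      = (PySem.List.pyRange 0 (lines.length : Int)).flatMap
          (fun _ => PySem.List.pyRange 0 K) := by
    rw [List.map_flatMap]
    simp [List.map_map, Function.comp_def]
  have hkeys : (((PySem.List.pyRange 0 (lines.length : Int)).flatMap (fun i =>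
      (PySem.List.pyRange 0 K).map (fun col =>
        (col, h ((PySem.List.pyGet? lines i).getD []) col)))).foldl
        (fun d p => d.modify p.1 [] (· ++ [p.2])) PySem.Dict.empty).keys
      = PySem.List.pyRange 0 K := by
    rw [PySem.Dict.keys_foldl_modify_key _ Prod.fst [] (fun _ p => (· ++ [p.2]))]
    rw [show (PySem.Dict.empty : PySem.Dict Int (List (List Char))).keys = [] from rfl]
    rw [hfst]
    rw [PySem.List.pyRange_one_cons hR, List.flatMap_cons]
    rw [pv_set_update_append]
    rw [pv_set_update_fresh _ [] (by simp) (PySem.List.nodup_pyRange_one 0 K)]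
    rw [List.nil_append]
    apply pv_set_update_mem
    intro x hx
    obtain ⟨i, _, hxm⟩ := List.mem_flatMap.mp hx
    exact hxm
  have hget : ∀ col ∈ PySem.List.pyRange 0 K,
      (((PySem.List.pyRange 0 (lines.length : Int)).flatMap (fun i =>
        (PySem.List.pyRange 0 K).map (fun col =>
          (col, h ((PySem.List.pyGet? lines i).getD []) col)))).foldl
          (fun d p => d.modify p.1 [] (· ++ [p.2])) PySem.Dict.empty).getD col []
      = lines.map (fun line => h line col) := by
    intro col hcol
    rw [PySem.Dict.getD_foldl_modify_append]
    rw [show (PySem.Dict.empty : PySem.Dict Int (List (List Char))).getD col [] = [] from rfl]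
    rw [List.nil_append]
    rw [List.filter_flatMap]
    simp only [List.filter_map, Function.comp_def]
    rw [show (PySem.List.pyRange 0 K).filter (fun c => c == col) = [col] from
      pv_filter_beq_singleton _ _ (PySem.List.nodup_pyRange_one 0 K) hcol]
    simp only [List.map_cons, List.map_nil]
    rw [List.map_flatMap]
    simp only [List.map_cons, List.map_nil]
    rw [pv_flatMap_singleton]
    rw [show (fun i => h ((PySem.List.pyGet? lines i).getD []) col)
          = ((fun line => h line col) ∘ (fun i => PySem.List.pyGetD lines i [])) from rfl]
    rw [← List.map_map]
    rw [PySem.List.map_pyGetD_pyRange_zero' lines ([] : List Char)]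
  rw [hkeys]
  rw [PySem.List.foldl_congr_mem _ _
    (fun sum col => sum + pvSolve (lines.map (fun line => h line col))) 0
    (fun acc col hcol => by rw [hget col hcol])]
  rw [PySem.List.foldl_add _ (fun col => pvSolve (lines.map (fun line => h line col)))]
  rw [zero_add]

theorem pv_A_eq_sum (input : String) :
    part_two input =
      ((pvPairs (pvSI (pvLast (pvLines input)))).map
        (fun p => pvSolve ((pvLines input).map (pvSliceFor p)))).sum := by
  unfold part_two
  dsimp only
  refine Eq.trans (pv_A_dict (pvLines input) (pvLines_ne_nil input)
    ((pvSI (pvLast (pvLines input))).length : Int)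
    (fun line col =>
      if col ≠ ((pvSI (pvLast (pvLines input))).length : Int) - 1 then
        PySem.List.slice line
          (some ((PySem.List.pyGet? (pvSI (pvLast (pvLines input))) col).getD 0))
          (some ((PySem.List.pyGet? (pvSI (pvLast (pvLines input))) (col + 1)).getD 0))
      else
        PySem.List.slice line
          (some ((PySem.List.pyGet? (pvSI (pvLast (pvLines input))) col).getD 0)) none)) ?_
  rw [← pv_map_range_pairs (pvSI (pvLast (pvLines input)))
    (fun s e? => pvSolve ((pvLines input).map (pvSliceFor (s, e?))))]
  apply congrArg List.sum
  apply List.map_congr_left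
  intro col hcol
  by_cases hc : col ≠ ((pvSI (pvLast (pvLines input))).length : Int) - 1
  · simp only [if_pos hc]
    rfl
  · simp only [if_neg hc]
    rfl

theorem pvSignAt_nat (lastL : List Char) (j : Nat) (hj : j < lastL.length) :
    pvSignAt lastL (j : Int) = lastL[j] := by
  unfold pvSignAt
  rw [if_pos (by omega : (j : Int) < (lastL.length : Int))]
  rw [PySem.List.pyGet?_natCast, List.getElem?_eq_getElem hj]
  rfl

theorem pv_notq_space (lastL : List Char)
    (hch : ∀ c ∈ lastL, c = ' ' ∨ c = '*' ∨ c = '+') (j : Nat) (hj : j < lastL.length)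
    (hq : ¬ pvQ lastL (j : Int) = true) : lastL[j] = ' ' := by
  have hs := pvSignAt_nat lastL j hj
  rcases hch lastL[j] (List.getElem_mem hj) with h | h | h
  · exact h
  · exact absurd (by unfold pvQ; rw [hs, h]; rfl) hq
  · exact absurd (by unfold pvQ; rw [hs, h]; simp) hq

theorem pv_last_map (f : List Char → List Char) (l : List (List Char)) (h : l ≠ []) :
    pvLast (l.map f) = f (pvLast l) := by
  unfold pvLast
  rw [pv_pyGet_neg_one _ _ (by simpa using h : l.map f ≠ []), pv_pyGet_neg_one _ _ h]
  rw [List.getLast_eq_getElem, List.getLast_eq_getElem, List.getElem_map]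
  congr 1
  simp

theorem pv_mem_SI_facts (lastL : List Char) (s : Int) (h : s ∈ pvSI lastL) :
    0 ≤ s ∧ s < (lastL.length : Int) ∧ pvQ lastL s = true :=
  ⟨((mem_pvSI _ s).mp h).2, pvSI_lt_len _ s h, ((mem_pvSI _ s).mp h).1⟩

theorem pv_filter_take_drop_space (lastL : List Char)
    (hch : ∀ c ∈ lastL, c = ' ' ∨ c = '*' ∨ c = '+')
    (a m : Nat) (ha : a < lastL.length)
    (hq : pvQ lastL (a : Int) = true) (hm : 0 < m)
    (hmid : ∀ j : Nat, a < j → j < a + m → j < lastL.length → ¬ pvQ lastL (j : Int) = true) :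
    ((lastL.drop a).take m).filter (· ≠ ' ') = [pvSignAt lastL (a : Int)] := by
  rw [List.drop_eq_getElem_cons ha]
  rw [show m = (m - 1) + 1 from by omega, List.take_succ_cons]
  rw [List.filter_cons]
  have hhead : lastL[a] = pvSignAt lastL (a : Int) := (pvSignAt_nat lastL a ha).symm
  have hne : (lastL[a] ≠ ' ') := by
    unfold pvQ at hq
    rcases Bool.or_eq_true_iff.mp hq with h | h <;>
      [rw [hhead, show pvSignAt lastL (a:Int) = '*' from by simpa using h];
       rw [hhead, show pvSignAt lastL (a:Int) = '+' from by simpa using h]] <;> simp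
  rw [if_pos (by simpa using hne)]
  rw [hhead]
  congr 1
  rw [List.filter_eq_nil_iff]
  intro c hc
  obtain ⟨k, hk, hck⟩ := List.getElem_of_mem hc
  rw [List.getElem_take, List.getElem_drop] at hck
  have hklen : a + 1 + k < lastL.length := by
    have := hk
    simp only [List.length_take, List.length_drop] at this
    omega
  have : lastL[a + 1 + k] = ' ' := by
    apply pv_notq_space lastL hch _ hklen
    apply hmid (a + 1 + k) (by omega) (by
      have := hk
      simp only [List.length_take, List.length_drop] at this
      omega) hklen
  rw [← hck, this]
  simp

theorem pv_block_sign (lines : List (List Char)) (hne : lines ≠ [])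
    (hch : ∀ c ∈ pvLast lines, c = ' ' ∨ c = '*' ∨ c = '+')
    (p : Int × Option Int) (hp : p ∈ pvPairs (pvSI (pvLast lines))) :
    pvProblemSign (lines.map (pvSliceFor p)) = [pvSignAt (pvLast lines) p.1] := by
  unfold pvProblemSign
  rw [pv_last_map _ _ hne]
  rw [pv_replace_space]
  set lastL := pvLast lines with hlastL
  have hsSI : p.1 ∈ pvSI lastL := mem_fst_pvPairs _ _ hp
  obtain ⟨hs0, hsL, hsq⟩ := pv_mem_SI_facts lastL p.1 hsSI
  have hsort := pvSI_sorted lastL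
  obtain ⟨sI, eo⟩ := p
  simp only at hs0 hsL hsq hsSI ⊢
  obtain ⟨s, rfl⟩ : ∃ s : Nat, (s : Int) = sI := ⟨sI.toNat, by omega⟩
  have hsLn : s < lastL.length := by omega
  cases hpe : eo with
  | some e =>
    obtain ⟨heSI, hse, hbet⟩ := pvPairs_some _ hsort _ e (by rw [← hpe]; exact hp)
    have he0 : 0 ≤ e := (pv_mem_SI_facts lastL e heSI).1
    have hslice : pvSliceFor ((s : Int), some e) lastL = (lastL.drop s).take (e.toNat - s) := by
      unfold pvSliceFor
      exact PySem.List.slice_toNat lastL (by omega) he0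
    rw [hslice]
    apply pv_filter_take_drop_space lastL hch s (e.toNat - s) hsLn hsq (by omega)
    intro j hj1 hj2 hjlen hqj
    exact hbet (j : Int) (by omega) (by omega) ((mem_pvSI _ _).mpr ⟨hqj, by omega⟩)
  | none =>
    have hmax := pvPairs_none _ hsort _ (by rw [← hpe]; exact hp)
    have hslice : pvSliceFor ((s : Int), none) lastL = (lastL.drop s).take (lastL.length - s) := by
      unfold pvSliceFor
      rw [PySem.List.slice_some_none]
      rw [show PySem.List.clampIdx lastL.length ((s : Nat) : Int) = s from by
        unfold PySem.List.clampIdx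
        rw [if_neg (by omega)]
        simp
        omega]
      rw [List.take_of_length_le (by simp)]
    rw [hslice]
    apply pv_filter_take_drop_space lastL hch s (lastL.length - s) hsLn hsq (by omega)
    intro j hj1 hj2 hjlen hqj
    have := hmax (j : Int) ((mem_pvSI _ _).mpr ⟨hqj, by omega⟩)
    omega

theorem pv_colDigits_of_ge (nr : List (List Char)) (j : Int)
    (h : ∀ r ∈ nr, (r.length : Int) ≤ j) : pvColDigits nr j = [] := by
  unfold pvColDigits
  have key : ∀ (l : List (List Char)) (acc : List Char), (∀ r ∈ l, (r.length : Int) ≤ j) →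
      l.foldl (fun acc r =>
        if j < (r.length : Int) ∧ (PySem.List.pyGet? r j).getD ' ' ≠ ' '
        then acc ++ [(PySem.List.pyGet? r j).getD ' '] else acc) acc = acc := by
    intro l
    induction l with
    | nil => intro acc _; rfl
    | cons r t ih =>
      intro acc hh
      simp only [List.foldl_cons]
      rw [if_neg (by
        rintro ⟨h1, _⟩
        have := hh r (by simp)
        omega)]
      exact ih acc (fun r hr => hh r (List.mem_cons_of_mem _ hr))
  exact key nr [] h

theorem pv_sliceFor_getElem (r : List Char) (s : Nat) (eo : Option Int)
    (he : ∀ e, eo = some e → 0 ≤ e) (col : Nat)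
    (h : col < (pvSliceFor ((s : Int), eo) r).length) :
    ∃ hb : s + col < r.length, (pvSliceFor ((s : Int), eo) r)[col]'h = r[s + col]'hb := by
  cases eo with
  | some e =>
    have he0 : 0 ≤ e := he e rfl
    have hsl : pvSliceFor ((s : Int), some e) r = (r.drop s).take (e.toNat - s) := by
      unfold pvSliceFor
      exact PySem.List.slice_toNat r (by omega) he0
    simp only [hsl] at h ⊢
    have hb : s + col < r.length := by
      simp only [List.length_take, List.length_drop] at h
      omega
    refine ⟨hb, ?_⟩
    rw [List.getElem_take, List.getElem_drop]
  | none =>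
    have hsl : pvSliceFor ((s : Int), none) r = r.drop s := by
      unfold pvSliceFor
      rw [PySem.List.slice_some_none]
      unfold PySem.List.clampIdx
      rw [if_neg (by omega)]
      simp
    simp only [hsl] at h ⊢
    have hb : s + col < r.length := by
      simp only [List.length_drop] at h
      omega
    refine ⟨hb, ?_⟩
    rw [List.getElem_drop]

theorem pv_ints_core (lines : List (List Char)) (hne : lines ≠ [])
    (hlen : ∀ r ∈ lines.dropLast, r.length = (lines.headD []).length)
    (s : Nat) (eo : Option Int) (he : ∀ e, eo = some e → 0 ≤ e) :
    pvProblemInts (lines.map (pvSliceFor ((s : Int), eo))) =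
      pvNums lines.dropLast
        (PySem.List.pyRange (s : Int)
          ((s : Int) + ((pvSliceFor ((s : Int), eo) (lines.headD [])).length : Int))) := by
  set nr := lines.dropLast with hnr
  set F := pvSliceFor ((s : Int), eo) with hF
  set blk := lines.map F with hblk
  set B0 : Nat := (F (lines.headD [])).length with hB0
  set inner : Int → List Char := fun col =>
    (PySem.List.pyRange 0 ((blk.length : Int) - 1)).foldl
      (fun res row =>
        if PySem.List.pyGetD (PySem.List.pyGetD blk row []) col ' ' ≠ ' '
        then res ++ [PySem.List.pyGetD (PySem.List.pyGetD blk row []) col ' '] else res) []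
    with hinner
  have hhead : (PySem.List.pyGet? blk 0).getD [] = F (lines.headD []) := by
    rw [show (0 : Int) = ((0 : Nat) : Int) from rfl, PySem.List.pyGet?_natCast]
    cases lines with
    | nil => exact absurd rfl hne
    | cons a t => simp [hblk]
  have hlenF : ∀ r ∈ nr, (F r).length = B0 := by
    intro r hr
    have h1 : r.length = (lines.headD []).length := hlen r hr
    rw [hB0, hF]
    unfold pvSliceFor
    cases eo with
    | some e =>
      simp only
      rw [PySem.List.length_slice, PySem.List.length_slice, h1]
    | none =>
      simp only
      rw [PySem.List.slice_some_none, PySem.List.slice_some_none]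
      simp [h1]
  have hcol : ∀ col : Int, 0 ≤ col → col < (B0 : Int) →
      inner col = pvColDigits nr ((s : Int) + col) := by
    intro col h0 hB
    obtain ⟨c, rfl⟩ : ∃ c : Nat, (c : Int) = col := ⟨col.toNat, by omega⟩
    rw [hinner]
    beta_reduce
    have hlb : (blk.length : Int) - 1 = (blk.dropLast.length : Int) := by
      have : lines.length ≠ 0 := fun hl => hne (List.length_eq_zero_iff.mp hl)
      simp only [hblk, List.length_map, List.length_dropLast]
      omega
    rw [hlb]
    rw [PySem.List.foldl_congr_mem _ _
      (fun res row =>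
        if PySem.List.pyGetD (PySem.List.pyGetD blk.dropLast row []) (c : Int) ' ' ≠ ' '
        then res ++ [PySem.List.pyGetD (PySem.List.pyGetD blk.dropLast row []) (c : Int) ' ']
        else res) []
      (by
        intro acc row hrow
        rw [PySem.List.mem_pyRange_one] at hrow
        have hgd : PySem.List.pyGetD blk row [] = PySem.List.pyGetD blk.dropLast row [] := by
          rw [PySem.List.pyGetD_eq_getElem _ _ hrow.1 (by
              simp only [List.length_dropLast] at hrow ⊢
              omega),
            PySem.List.pyGetD_eq_getElem _ _ hrow.1 (by
              simpa using hrow.2)]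
          exact (List.getElem_dropLast _).symm
        rw [hgd])]
    rw [PySem.List.foldl_pyRange_zero_pyGetD' blk.dropLast ([] : List Char)
      (fun res r =>
        if PySem.List.pyGetD r (c : Int) ' ' ≠ ' '
        then res ++ [PySem.List.pyGetD r (c : Int) ' '] else res) []]
    rw [show blk.dropLast = nr.map F from by rw [hblk, pv_dropLast_map, hnr]]
    rw [List.foldl_map]
    unfold pvColDigits
    apply PySem.List.foldl_congr_mem
    intro acc r hr
    have hclen : c < (F r).length := by
      rw [hlenF r hr]
      omega
    obtain ⟨hb, hval⟩ := pv_sliceFor_getElem r s eo he c hclen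
    have hchar : PySem.List.pyGetD (F r) (c : Int) ' ' = (PySem.List.pyGet? r ((s : Int) + (c : Int))).getD ' ' := by
      rw [PySem.List.pyGetD_eq_getElem _ _ (by omega) (by omega)]
      rw [show (s : Int) + (c : Int) = (((s + c : Nat) : Int)) from by push_cast; ring]
      rw [PySem.List.pyGet?_natCast, List.getElem?_eq_getElem hb]
      simpa using hval
    rw [hchar]
    have hcond : ((s : Int) + (c : Int)) < (r.length : Int) := by omega
    by_cases hcc : (PySem.List.pyGet? r ((s : Int) + (c : Int))).getD ' ' ≠ ' '
    · rw [if_pos hcc, if_pos ⟨hcond, hcc⟩]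
    · rw [if_neg hcc, if_neg (by rintro ⟨_, hx⟩; exact hcc hx)]
  have houter : ∀ n : Nat, n ≤ B0 →
      (PySem.List.pyRange 0 (n : Int)).foldl
        (fun ints col =>
          if inner col ≠ [] then ints ++ [(PySem.Int.ofChars? (inner col)).getD 0] else ints) []
      = pvNums nr (PySem.List.pyRange (s : Int) ((s : Int) + (n : Int))) := by
    intro n
    induction n with
    | zero =>
      intro _
      rw [show ((0 : Nat) : Int) = 0 from rfl, PySem.List.pyRange_one_eq_nil le_rfl,
        PySem.List.pyRange_one_eq_nil (by omega)]
      rfl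
    | succ m ih =>
      intro hm
      rw [show ((m + 1 : Nat) : Int) = (m : Int) + 1 from by push_cast; ring]
      rw [PySem.List.pyRange_one_succ_right (by omega : (0 : Int) ≤ (m : Int))]
      rw [List.foldl_append, ih (by omega), List.foldl_cons, List.foldl_nil]
      rw [show (s : Int) + ((m : Int) + 1) = ((s : Int) + (m : Int)) + 1 from by ring]
      rw [PySem.List.pyRange_one_succ_right (by omega : (s : Int) ≤ (s : Int) + (m : Int))]
      rw [pvNums_append]
      rw [hcol (m : Int) (by omega) (by omega)]
      have hsing : pvNums nr [(s : Int) + (m : Int)]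
          = match pvColNum? nr ((s : Int) + (m : Int)) with | some n => [n] | none => [] :=
        pvNums_singleton nr _
      by_cases hd : pvColDigits nr ((s : Int) + (m : Int)) = []
      · rw [if_neg (by simpa using hd)]
        rw [hsing]
        simp [pvColNum?, hd]
      · rw [if_pos (by simpa using hd)]
        rw [hsing]
        simp [pvColNum?, hd]
  have hports : pvProblemInts blk =
      (PySem.List.pyRange 0 ((((PySem.List.pyGet? blk 0).getD []).length : Nat) : Int)).foldl
        (fun ints col =>
          if inner col ≠ [] then ints ++ [(PySem.Int.ofChars? (inner col)).getD 0] else ints) [] := rfl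
  rw [hports, hhead]
  exact houter B0 le_rfl

theorem pv_block_ints (lines : List (List Char)) (hne : lines ≠ [])
    (hlen : ∀ r ∈ lines.dropLast, r.length = (lines.headD []).length)
    (p : Int × Option Int) (hp : p ∈ pvPairs (pvSI (pvLast lines))) :
    pvProblemInts (lines.map (pvSliceFor p)) =
      pvNums lines.dropLast (PySem.List.pyRange p.1 (p.2.getD (pvWidth lines))) := by
  obtain ⟨sI, eo⟩ := p
  set lastL := pvLast lines with hlastL
  have hsSI : sI ∈ pvSI lastL := mem_fst_pvPairs _ _ hp
  obtain ⟨hs0, hsL, hsq⟩ := pv_mem_SI_facts lastL sI hsSI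
  have hsort := pvSI_sorted lastL
  obtain ⟨s, rfl⟩ : ∃ s : Nat, (s : Int) = sI := ⟨sI.toNat, by omega⟩
  have he : ∀ e, eo = some e → 0 ≤ e := by
    intro e hee
    exact (pv_mem_SI_facts lastL e (pvPairs_some _ hsort _ e (hee ▸ hp)).1).1
  simp only
  rw [pv_ints_core lines hne hlen s eo he]
  set L0 : Nat := (lines.headD []).length with hL0
  set B0 : Nat := (pvSliceFor ((s : Int), eo) (lines.headD [])).length with hB0
  have hheadmem : lines.headD [] ∈ lines := by
    cases lines with
    | nil => exact absurd rfl hne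
    | cons a t => simp
  have hL0W : (L0 : Int) ≤ pvWidth lines := pvWidth_ge lines _ hheadmem
  have hLW : ((lastL.length : Int)) ≤ pvWidth lines := by
    obtain ⟨hm, _⟩ := pv_last_mem lines hne
    exact pvWidth_ge lines _ hm
  have hlenInt : ∀ r ∈ lines.dropLast, (r.length : Int) = (L0 : Int) := by
    intro r hr
    rw [hlen r hr]
  cases eo with
  | some e =>
    obtain ⟨heSI, hse, hbet⟩ := pvPairs_some _ hsort _ e hp
    have he0 : 0 ≤ e := he e rfl
    have heInt : (e.toNat : Int) = e := by omega
    have hB0val : B0 = min e.toNat L0 - min s L0 := by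
      rw [hB0]
      unfold pvSliceFor
      simp only
      rw [PySem.List.length_slice]
      unfold PySem.List.clampIdx
      rw [if_neg (by omega : ¬ (e < 0)), if_neg (by omega : ¬ ((s : Int) < 0))]
      omega
    have hB0le : (s : Int) + (B0 : Int) ≤ (some e).getD (pvWidth lines) := by
      simp only [Option.getD_some]
      omega
    have hempty : ∀ j ∈ PySem.List.pyRange ((s : Int) + (B0 : Int)) ((some e).getD (pvWidth lines)),
        pvColDigits lines.dropLast j = [] := by
      intro j hj
      rw [PySem.List.mem_pyRange_one] at hj
      simp only [Option.getD_some] at hj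
      apply pv_colDigits_of_ge
      intro r hr
      rw [hlenInt r hr]
      omega
    rw [show pvNums lines.dropLast (PySem.List.pyRange (s : Int) ((some e).getD (pvWidth lines)))
          = pvNums lines.dropLast (PySem.List.pyRange (s : Int) ((s : Int) + (B0 : Int))) from by
      rw [PySem.List.pyRange_one_append ((s : Int)) ((s : Int) + (B0 : Int)) _ (by omega) hB0le]
      rw [pvNums_append, pvNums_nil_of _ _ hempty, List.append_nil]]
  | none =>
    have hmax := pvPairs_none _ hsort _ hp
    have hB0val : B0 = L0 - min s L0 := by
      rw [hB0]
      unfold pvSliceFor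
      simp only
      rw [PySem.List.slice_some_none]
      rw [List.length_drop]
      unfold PySem.List.clampIdx
      rw [if_neg (by omega : ¬ ((s : Int) < 0))]
      omega
    have hB0le : (s : Int) + (B0 : Int) ≤ (none : Option Int).getD (pvWidth lines) := by
      simp only [Option.getD_none]
      omega
    have hempty : ∀ j ∈ PySem.List.pyRange ((s : Int) + (B0 : Int))
        ((none : Option Int).getD (pvWidth lines)),
        pvColDigits lines.dropLast j = [] := by
      intro j hj
      rw [PySem.List.mem_pyRange_one] at hj
      apply pv_colDigits_of_ge
      intro r hr
      rw [hlenInt r hr]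
      omega
    rw [show pvNums lines.dropLast
          (PySem.List.pyRange (s : Int) ((none : Option Int).getD (pvWidth lines)))
          = pvNums lines.dropLast (PySem.List.pyRange (s : Int) ((s : Int) + (B0 : Int))) from by
      rw [PySem.List.pyRange_one_append ((s : Int)) ((s : Int) + (B0 : Int)) _ (by omega) hB0le]
      rw [pvNums_append, pvNums_nil_of _ _ hempty, List.append_nil]]

theorem pv_block_solve (lines : List (List Char)) (hne : lines ≠ [])
    (hlen : ∀ r ∈ lines.dropLast, r.length = (lines.headD []).length)
    (hch : ∀ c ∈ pvLast lines, c = ' ' ∨ c = '*' ∨ c = '+')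
    (p : Int × Option Int) (hp : p ∈ pvPairs (pvSI (pvLast lines))) :
    pvSolve (lines.map (pvSliceFor p)) =
      pvOpFold (pvSignAt (pvLast lines) p.1) (pvIdent (pvSignAt (pvLast lines) p.1))
        (pvNums lines.dropLast (PySem.List.pyRange p.1 (p.2.getD (pvWidth lines)))) := by
  unfold pvSolve
  rw [pv_block_sign lines hne hch p hp, pv_block_ints lines hne hlen p hp]
  have hcq : pvQ (pvLast lines) p.1 = true :=
    (pv_mem_SI_facts _ _ (mem_fst_pvPairs _ _ hp)).2.2
  unfold pvQ at hcq
  rcases Bool.or_eq_true_iff.mp hcq with h | h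
  · have hc : pvSignAt (pvLast lines) p.1 = '*' := by simpa using h
    rw [hc]
    rw [if_pos rfl]
    unfold pvOpFold pvIdent
    simp
  · have hc : pvSignAt (pvLast lines) p.1 = '+' := by simpa using h
    rw [hc]
    rw [if_neg (by simp)]
    unfold pvOpFold pvIdent
    simp

theorem pv_A_zero (input : String) (h : pvSI (pvLast (pvLines input)) = []) :
    part_two input = 0 := by
  unfold part_two
  dsimp only
  rw [h]
  have hfix : ∀ (l : List Int) (d : PySem.Dict Int (List (List Char))),
      l.foldl (fun d _ => d) d = d := by
    intro l
    induction l with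
    | nil => intro d; rfl
    | cons x t ih => intro d; exact ih d
  have hinner : (PySem.List.pyRange 0 (([] : List Int).length : Int)) = [] := by
    simp [PySem.List.pyRange_one_eq_nil]
  rw [show (fun (d : PySem.Dict Int (List (List Char))) (i : Int) =>
        (PySem.List.pyRange 0 (([] : List Int).length : Int)).foldl (fun d col =>
          d.modify col [] (· ++ [if col ≠ (([] : List Int).length : Int) - 1 then
              PySem.List.slice ((PySem.List.pyGet? (pvLines input) i).getD [])
                (some ((PySem.List.pyGet? ([] : List Int) col).getD 0))
                (some ((PySem.List.pyGet? ([] : List Int) (col + 1)).getD 0))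
            else PySem.List.slice ((PySem.List.pyGet? (pvLines input) i).getD [])
                (some ((PySem.List.pyGet? ([] : List Int) col).getD 0)) none])) d)
      = (fun d _ => d) from by
    funext d i
    rw [hinner]
    rfl]
  rw [hfix]
  rfl

-- ===== VERDICT (by name: the statement is the Claim_ definition above) =====
theorem part_two_spec : Claim_equal_part_two := by
  intro input hdom hpre
  unfold Spec_part_two
  rw [pv_alt_eq_AB input]
  have hne := pvLines_ne_nil input
  have hpre' : ((pvLast (pvLines input)).all (fun c => !(c == '*' || c == '+')) = true) ∨
      (((pvLines input).dropLast.all (fun r => r.length == ((pvLines input).headD []).length) = true) ∧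
       ((pvLines input).dropLast.all (fun r => r.all (fun c => PySem.Chars.isdigit c || c == ' ')) = true) ∧
       ((pvLast (pvLines input)).all (fun c => c == ' ' || c == '*' || c == '+') = true)) := hpre
  rcases hpre' with h1b | ⟨hlenb, hdigb, hchb⟩
  · have h1 : ∀ c ∈ pvLast (pvLines input), ¬(c = '*' ∨ c = '+') := by
      intro c hc
      have hcb := List.all_eq_true.mp h1b c hc
      simp only [Bool.not_eq_true', Bool.or_eq_false_iff, beq_eq_false_iff_ne, ne_eq] at hcb
      rintro (rfl | rfl)
      · exact hcb.1 rfl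
      · exact hcb.2 rfl
    have hSI : pvSI (pvLast (pvLines input)) = [] := by
      rw [pvSI_eq_filter]
      rw [List.filter_eq_nil_iff]
      intro j hj
      rw [PySem.List.mem_pyRange_one] at hj
      obtain ⟨jn, rfl⟩ : ∃ jn : Nat, (jn : Int) = j := ⟨j.toNat, by omega⟩
      have hjl : jn < (pvLast (pvLines input)).length := by omega
      have hsgn := pvSignAt_nat (pvLast (pvLines input)) jn hjl
      intro hq
      unfold pvQ at hq
      have hmem := List.getElem_mem hjl
      rcases Bool.or_eq_true_iff.mp hq with h | h
      · exact h1 _ hmem (Or.inl (by rw [← hsgn]; simpa using h))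
      · exact h1 _ hmem (Or.inr (by rw [← hsgn]; simpa using h))
    rw [pv_A_zero input hSI, hSI]
    rfl
  · have hlen : ∀ r ∈ (pvLines input).dropLast, r.length = ((pvLines input).headD []).length := by
      intro r hr
      have := List.all_eq_true.mp hlenb r hr
      simpa using this
    have hch : ∀ c ∈ pvLast (pvLines input), c = ' ' ∨ c = '*' ∨ c = '+' := by
      intro c hc
      have := List.all_eq_true.mp hchb c hc
      simp only [Bool.or_eq_true, beq_iff_eq] at this
      tauto
    rw [pv_A_eq_sum input]
    rw [List.map_congr_left
      (fun p hp => pv_block_solve (pvLines input) hne hlen hch p hp)]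
    rw [sum_pvPairs_eq_AB]
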